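-- pv_equiv track=rewrite | github.com/diable201/YandexAlgorithms | lec_03/3.py | words_in_dict
-- ===== SOURCE A (Python) =====
-- def words_in_dict(dictionary, text):
--     goodwords = set(dictionary)
--     for word in dictionary:
--         for delpos in range(len(word)):
--             goodwords.add(word[:delpos] + word[delpos + 1:])
--     ans = []
--     for word in text:
--         ans.append(word in goodwords)
--     return ans
-- ===== SOURCE B (Python) =====
-- def one_del(w, t):
--     # True iff deleting exactly one character of w yields t (len(w) == len(t) + 1).
--     i = 0
--     n = len(t)
--     while i < n and w[i] == t[i]:
--         i += 1
--     return w[i + 1:] == t[i:]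
--
--
-- def words_in_dict(dictionary, text):
--     words = set(dictionary)
--     ans = []
--     for t in text:
--         n = len(t)
--         ans.append(t in words or any(len(w) == n + 1 and one_del(w, t) for w in dictionary))
--     return ans
-- ===== Notes on version B (the rewrite author's own statement) =====
-- stated objective: alternative
-- what changed: Instead of precomputing the set of all one-deletion variants of every dictionary word, B answers each text word at query time: exact membership in a set of the dictionary, else a scan of the dictionary testing words one character longer with a first-mismatch single-deletion comparison; no deletion strings are ever materialised.
import Mathlib
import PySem

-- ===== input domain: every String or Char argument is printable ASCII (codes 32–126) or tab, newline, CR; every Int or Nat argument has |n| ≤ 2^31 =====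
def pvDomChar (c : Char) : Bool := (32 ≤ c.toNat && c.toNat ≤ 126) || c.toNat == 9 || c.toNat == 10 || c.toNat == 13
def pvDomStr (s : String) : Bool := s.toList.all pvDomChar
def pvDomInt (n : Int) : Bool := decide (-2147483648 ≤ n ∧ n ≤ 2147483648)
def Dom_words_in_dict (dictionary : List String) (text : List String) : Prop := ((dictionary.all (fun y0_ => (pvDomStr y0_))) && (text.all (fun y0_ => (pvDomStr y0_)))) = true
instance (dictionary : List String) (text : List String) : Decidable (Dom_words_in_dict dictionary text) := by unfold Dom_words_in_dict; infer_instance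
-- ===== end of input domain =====

-- B replaces A's precomputed set of every one-deletion variant by a query-time scan of the
-- dictionary with a first-mismatch single-deletion comparison (objective: alternative algorithm).

-- ===== PORT A =====
-- word[:delpos] + word[delpos + 1:]
def pyDel (word : String) (delpos : Int) : String :=
  PySem.Str.slice word none (some delpos) ++ PySem.Str.slice word (some (delpos + 1)) none

def words_in_dict (dictionary : List String) (text : List String) : List Bool :=
  let goodwords :=
    dictionary.foldl
      (fun gw word =>
        (PySem.List.pyRange 0 (PySem.Str.len word) 1).foldl
          (fun gw2 delpos => PySem.Set.add gw2 (pyDel word delpos)) gw)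
      (PySem.Set.ofList dictionary)
  text.map (fun word => PySem.Set.contains goodwords word)

-- ===== PORT B =====
-- one_del(w, t): scan to the first mismatching position, then compare w[i+1:] with t[i:]
def oneDel : List Char → List Char → Bool
  | [], t => t.isEmpty
  | _ :: w, [] => w.isEmpty
  | a :: w, b :: t => if a == b then oneDel w t else w == b :: t

def words_in_dict_alt (dictionary : List String) (text : List String) : List Bool :=
  let words := PySem.Set.ofList dictionary
  text.map (fun t =>
    PySem.Set.contains words t ||
      dictionary.any (fun w =>
        PySem.Str.len w == PySem.Str.len t + 1 && oneDel w.toList t.toList))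

-- ===== PRECONDITION & SPEC =====
def Spec_words_in_dict (dictionary : List String) (text : List String) (out : List Bool) : Prop := out = words_in_dict_alt dictionary text
instance (dictionary : List String) (text : List String) (out : List Bool) : Decidable (Spec_words_in_dict dictionary text out) := by unfold Spec_words_in_dict; infer_instance

-- ===== CLAIM (what is proved, stated in full; the proofs are below) =====
def Claim_equal_words_in_dict : Prop := ∀ (dictionary : List String) (text : List String), Dom_words_in_dict dictionary text → Spec_words_in_dict dictionary text (words_in_dict dictionary text)

-- ===== LEMMAS AND PROOFS =====

-- membership in a fold that only adds g j for j ∈ l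
theorem mem_foldl_add_g {α : Type} [BEq α] [LawfulBEq α] (g : Int → α) (l : List Int)
    (s : PySem.Set α) (x : α) :
    x ∈ l.foldl (fun s j => PySem.Set.add s (g j)) s ↔ x ∈ s ∨ ∃ j ∈ l, g j = x := by
  induction l generalizing s with
  | nil => simp
  | cons a l ih =>
    simp only [List.foldl_cons, ih, PySem.Set.mem_add, List.mem_cons]
    constructor
    · rintro ((h | h) | ⟨j, hj, hg⟩)
      · exact Or.inl h
      · exact Or.inr ⟨a, Or.inl rfl, h.symm⟩
      · exact Or.inr ⟨j, Or.inr hj, hg⟩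
    · rintro (h | ⟨j, (rfl | hj), hg⟩)
      · exact Or.inl (Or.inl h)
      · exact Or.inl (Or.inr hg.symm)
      · exact Or.inr ⟨j, hj, hg⟩

-- membership in A's goodwords set
theorem mem_goodwords (dictionary : List String) (x : String) :
    x ∈ dictionary.foldl
        (fun gw word =>
          (PySem.List.pyRange 0 (PySem.Str.len word) 1).foldl
            (fun gw2 delpos => PySem.Set.add gw2 (pyDel word delpos)) gw)
        (PySem.Set.ofList dictionary)
      ↔ x ∈ dictionary ∨
        ∃ w ∈ dictionary, ∃ j ∈ PySem.List.pyRange 0 (PySem.Str.len w) 1, pyDel w j = x := by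
  have main : ∀ (l : List String) (s : PySem.Set String),
      x ∈ l.foldl
          (fun gw word =>
            (PySem.List.pyRange 0 (PySem.Str.len word) 1).foldl
              (fun gw2 delpos => PySem.Set.add gw2 (pyDel word delpos)) gw) s
        ↔ x ∈ s ∨ ∃ w ∈ l, ∃ j ∈ PySem.List.pyRange 0 (PySem.Str.len w) 1, pyDel w j = x := by
    intro l
    induction l with
    | nil => simp
    | cons a l ih =>
      intro s
      simp only [List.foldl_cons, ih, mem_foldl_add_g, List.mem_cons]
      constructor
      · rintro ((h | h) | ⟨w, hw, hj⟩)
        · exact Or.inl h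
        · exact Or.inr ⟨a, Or.inl rfl, h⟩
        · exact Or.inr ⟨w, Or.inr hw, hj⟩
      · rintro (h | ⟨w, (rfl | hw), hj⟩)
        · exact Or.inl (Or.inl h)
        · exact Or.inl (Or.inr hj)
        · exact Or.inr ⟨w, hw, hj⟩
  rw [main, PySem.Set.mem_ofList]

-- pyDel at the character level
theorem toList_pyDel (w : String) (j : Int) (hj : 0 ≤ j) :
    (pyDel w j).toList = w.toList.take j.toNat ++ w.toList.drop (j.toNat + 1) := by
  have h1 : (j + 1).toNat = j.toNat + 1 := by omega
  simp only [pyDel, String.toList_append, PySem.Str.toList_slice, PySem.Chars.slice_eq_listSlice]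
  rw [PySem.List.slice_to w.toList hj,
    PySem.List.slice_from w.toList (show (0:Int) ≤ j + 1 by omega), h1]

-- a one-character deletion shortens the word by exactly one
theorem length_of_del {w t : List Char} {j : Nat} (hj : j < w.length)
    (h : t = w.take j ++ w.drop (j + 1)) : w.length = t.length + 1 := by
  subst h
  simp only [List.length_append, List.length_take, List.length_drop]
  omega

-- B's first-mismatch test finds a deletion iff one exists (under the length hypothesis)
theorem oneDel_iff (w t : List Char) (h : w.length = t.length + 1) :
    oneDel w t = true ↔ ∃ j < w.length, t = w.take j ++ w.drop (j + 1) := by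
  induction w generalizing t with
  | nil => simp at h
  | cons a w ih =>
    cases t with
    | nil =>
      have hw : w = [] := by simpa using h
      subst hw
      simp [oneDel]
    | cons b t =>
      have hlen : w.length = t.length + 1 := by simpa using h
      by_cases hab : a = b
      · subst hab
        have e : oneDel (a :: w) (a :: t) = oneDel w t := by simp [oneDel]
        rw [e, ih t hlen]
        constructor
        · rintro ⟨j, hj, rfl⟩
          exact ⟨j + 1, by simpa using Nat.succ_lt_succ hj, by simp⟩
        · rintro ⟨j, hj, hs⟩
          cases j with
          | zero =>
            simp only [List.take_zero, List.nil_append, List.drop_succ_cons, List.drop_zero] at hs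
            subst hs
            exact ⟨0, by simp, by simp⟩
          | succ k =>
            simp only [List.take_succ_cons, List.drop_succ_cons, List.cons_append,
              List.cons.injEq] at hs
            exact ⟨k, by simpa using Nat.lt_of_succ_lt_succ hj, hs.2⟩
      · have e : oneDel (a :: w) (b :: t) = (w == b :: t) := by simp [oneDel, hab]
        rw [e, beq_iff_eq]
        constructor
        · intro hwe
          exact ⟨0, by omega, by simp [hwe]⟩
        · rintro ⟨j, hj, hs⟩
          cases j with
          | zero =>
            simp only [List.take_zero, List.nil_append, List.drop_succ_cons, List.drop_zero] at hs
            simp [hs]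
          | succ k =>
            simp only [List.take_succ_cons, List.cons_append, List.cons.injEq] at hs
            exact absurd hs.1.symm hab

-- per-word equivalence: A's deletion-range scan matches B's length + one_del test
theorem perword_iff (w t : String) :
    (∃ j ∈ PySem.List.pyRange 0 (PySem.Str.len w) 1, pyDel w j = t)
      ↔ (PySem.Str.len w == PySem.Str.len t + 1 && oneDel w.toList t.toList) = true := by
  simp only [Bool.and_eq_true, beq_iff_eq, PySem.Str.len_eq]
  constructor
  · rintro ⟨j, hj, hdel⟩
    rw [PySem.List.mem_pyRange_one] at hj
    have hjn : j.toNat < w.toList.length := by omega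
    have ht : t.toList = w.toList.take j.toNat ++ w.toList.drop (j.toNat + 1) := by
      rw [← hdel, toList_pyDel w j hj.1]
    have hlen := length_of_del hjn ht
    refine ⟨by omega, (oneDel_iff _ _ hlen).mpr ⟨j.toNat, hjn, ht⟩⟩
  · rintro ⟨hlen, hone⟩
    have hlen' : w.toList.length = t.toList.length + 1 := by omega
    obtain ⟨j, hj, ht⟩ := (oneDel_iff _ _ hlen').mp hone
    refine ⟨(j : Int), ?_, ?_⟩
    · rw [PySem.List.mem_pyRange_one]
      constructor
      · exact Int.natCast_nonneg j
      · exact_mod_cast hj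
    · apply String.toList_injective
      rw [toList_pyDel w j (Int.natCast_nonneg j)]
      simp [ht]

-- the per-text-word answers agree
theorem answer_eq (dictionary : List String) (t : String) :
    PySem.Set.contains
        (dictionary.foldl
          (fun gw word =>
            (PySem.List.pyRange 0 (PySem.Str.len word) 1).foldl
              (fun gw2 delpos => PySem.Set.add gw2 (pyDel word delpos)) gw)
          (PySem.Set.ofList dictionary)) t
      = (PySem.Set.contains (PySem.Set.ofList dictionary) t ||
          dictionary.any (fun w =>
            PySem.Str.len w == PySem.Str.len t + 1 && oneDel w.toList t.toList)) := by
  rw [Bool.eq_iff_iff]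
  rw [PySem.Set.contains_iff, mem_goodwords]
  rw [Bool.or_eq_true, PySem.Set.contains_iff, PySem.Set.mem_ofList, List.any_eq_true]
  constructor
  · rintro (h | ⟨w, hw, hj⟩)
    · exact Or.inl h
    · exact Or.inr ⟨w, hw, (perword_iff w t).mp hj⟩
  · rintro (h | ⟨w, hw, hj⟩)
    · exact Or.inl h
    · exact Or.inr ⟨w, hw, (perword_iff w t).mpr hj⟩

-- ===== VERDICT (by name: the statement is the Claim_ definition above) =====
theorem words_in_dict_spec : Claim_equal_words_in_dict := by
  intro dictionary text _
  unfold Spec_words_in_dict words_in_dict words_in_dict_alt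
  exact List.map_congr_left (fun t _ => answer_eq dictionary t)
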